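-- pv_equiv track=rewrite | github.com/PhongNTDo/RAGwKQ_integration | GeoQA/src/retreival.py | _map_passage_to_embedding_range
-- ===== SOURCE A (Python) =====
-- from collections import defaultdict
--
-- def _map_passage_to_embedding_range(embedding_map):
--     passage_indices = defaultdict(list)
--     for idx, p_id in enumerate(embedding_map):
--         passage_indices[p_id].append(idx)
--
--     passage_ranges = {}
--     for p_id, indices in passage_indices.items():
--         if indices:
--             passage_ranges[p_id] = (min(indices), max(indices) + 1)
--     return passage_ranges
-- ===== SOURCE B (Python) =====
-- def _map_passage_to_embedding_range(embedding_map):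
--     # Single pass: track (first, last) index per passage id; indices arrive in
--     # increasing order, so first is set once and last is just overwritten.
--     bounds = {}
--     for idx, p_id in enumerate(embedding_map):
--         prev = bounds.get(p_id)
--         if prev is None:
--             bounds[p_id] = (idx, idx)
--         else:
--             bounds[p_id] = (prev[0], idx)
--     return {p_id: (first, last + 1) for p_id, (first, last) in bounds.items()}
-- ===== Notes on version B (the rewrite author's own statement) =====
-- stated objective: simpler
-- what changed: Replaces the collect-all-indices defaultdict plus a second items() pass with min/max reductions by a single enumerate pass that keeps only a running (first, last) bound per id, exploiting that indices increase monotonically.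
import Mathlib
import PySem

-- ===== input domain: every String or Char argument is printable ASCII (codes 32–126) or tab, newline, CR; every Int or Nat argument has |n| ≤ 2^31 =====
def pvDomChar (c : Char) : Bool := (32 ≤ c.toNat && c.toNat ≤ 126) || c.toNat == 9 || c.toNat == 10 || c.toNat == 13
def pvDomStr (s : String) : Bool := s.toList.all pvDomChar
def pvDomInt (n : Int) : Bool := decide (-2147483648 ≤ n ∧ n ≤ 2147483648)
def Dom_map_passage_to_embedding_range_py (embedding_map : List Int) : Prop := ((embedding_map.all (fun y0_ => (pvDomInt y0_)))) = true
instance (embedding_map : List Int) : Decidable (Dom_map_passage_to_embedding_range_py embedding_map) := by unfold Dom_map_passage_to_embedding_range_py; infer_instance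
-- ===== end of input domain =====

-- B replaces A's collect-all-indices defaultdict plus a second min/max pass by a
-- single enumerate pass keeping a running (first, last) bound per id; same return value.

-- ===== PORT A =====
-- loop body of A's first loop: passage_indices[p_id].append(idx) on a defaultdict(list)
def pvGroupStep (d : PySem.Dict Int (List Int)) (p : Int × Int) : PySem.Dict Int (List Int) :=
  d.modify p.2 [] (fun l => l ++ [p.1])

-- loop body of A's second loop: if indices: passage_ranges[p_id] = (min(indices), max(indices) + 1)
def pvRangeStep (d : PySem.Dict Int (Int × Int)) (p : Int × List Int) : PySem.Dict Int (Int × Int) :=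
  if p.2.isEmpty then d
  else d.insert p.1 ((PySem.List.min? p.2 (fun x => x)).getD 0,
                     (PySem.List.max? p.2 (fun x => x)).getD 0 + 1)

def map_passage_to_embedding_range_py (embedding_map : List Int) : List (Int × Int × Int) :=
  let passage_indices :=
    (PySem.List.enumerate embedding_map).foldl pvGroupStep PySem.Dict.empty
  let passage_ranges := passage_indices.items.foldl pvRangeStep PySem.Dict.empty
  passage_ranges.items

-- ===== PORT B =====
-- loop body of B's single pass: bounds[p_id] = (idx, idx) on first sight, else (prev[0], idx)
def pvBoundStep (d : PySem.Dict Int (Int × Int)) (p : Int × Int) : PySem.Dict Int (Int × Int) :=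
  match d.get? p.2 with
  | some prev => d.insert p.2 (prev.1, p.1)
  | none => d.insert p.2 (p.1, p.1)

def map_passage_to_embedding_range_py_alt (embedding_map : List Int) : List (Int × Int × Int) :=
  let bounds := (PySem.List.enumerate embedding_map).foldl pvBoundStep PySem.Dict.empty
  bounds.items.map (fun q => (q.1, (q.2.1, q.2.2 + 1)))

-- ===== PRECONDITION & SPEC =====
def Spec_map_passage_to_embedding_range_py (embedding_map : List Int) (out : List (Int × Int × Int)) : Prop := out = map_passage_to_embedding_range_py_alt embedding_map
instance (embedding_map : List Int) (out : List (Int × Int × Int)) : Decidable (Spec_map_passage_to_embedding_range_py embedding_map out) := by unfold Spec_map_passage_to_embedding_range_py; infer_instance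

-- ===== CLAIM (what is proved, stated in full; the proofs are below) =====
def Claim_equal_map_passage_to_embedding_range_py : Prop := ∀ (embedding_map : List Int), Dom_map_passage_to_embedding_range_py embedding_map → Spec_map_passage_to_embedding_range_py embedding_map (map_passage_to_embedding_range_py embedding_map)

-- ===== LEMMAS AND PROOFS =====

-- B's stored bound for a group of occurrence indices l, read off A's index list: (min l, max l)
def pvMM (p : Int × List Int) : Int × (Int × Int) :=
  (p.1, ((PySem.List.min? p.2 (fun x => x)).getD 0, (PySem.List.max? p.2 (fun x => x)).getD 0))

theorem pv_min_append (l : List Int) (n : Int) (hl : l ≠ []) (h : ∀ i ∈ l, i < n) :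
    PySem.List.min? (l ++ [n]) (fun x => x) = PySem.List.min? l (fun x => x) := by
  obtain ⟨x, t, rfl⟩ := List.exists_cons_of_ne_nil hl
  rw [List.cons_append, PySem.List.min?_id_cons, PySem.List.min?_id_cons, List.foldl_append]
  have hmem : t.foldl min x ∈ x :: t :=
    PySem.List.min?_mem (xs := x :: t) (key := fun x => x) (by rw [PySem.List.min?_id_cons])
  have hlt : t.foldl min x < n := h _ hmem
  simp [List.foldl, min_eq_left hlt.le]

theorem pv_max_append (l : List Int) (n : Int) (h : ∀ i ∈ l, i < n) :
    PySem.List.max? (l ++ [n]) (fun x => x) = some n := by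
  obtain ⟨m, hm⟩ : ∃ m, PySem.List.max? (l ++ [n]) (fun x => x) = some m := by
    cases hmx : PySem.List.max? (l ++ [n]) (fun x => x) with
    | none => exact absurd ((PySem.List.max?_eq_none_iff _ _).mp hmx) (by simp)
    | some m => exact ⟨m, rfl⟩
  have hmem : m ∈ l ++ [n] := PySem.List.max?_mem hm
  have hmax : ∀ y ∈ l ++ [n], y ≤ m := PySem.List.max?_isMax hm
  have : m = n := by
    rcases List.mem_append.mp hmem with hin | hn
    · exact absurd (hmax n (by simp)) (not_le.mpr (h m hin))
    · simpa using hn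
  rw [hm, this]

theorem pvGroupStep_eq (d : PySem.Dict Int (List Int)) (p : Int × Int) :
    pvGroupStep d p = d.insert p.2 (d.getD p.2 [] ++ [p.1]) := rfl

-- the single-pass invariant: A's group dict has nodup keys and nonempty index lists
-- bounded by the prefix length, and B's bounds dict is A's groups mapped through (min, max)
theorem pv_invariant (em : List Int) :
    ((PySem.List.enumerate em).foldl pvGroupStep PySem.Dict.empty).keys.Nodup ∧
    (∀ p ∈ ((PySem.List.enumerate em).foldl pvGroupStep PySem.Dict.empty).items,
        p.2 ≠ [] ∧ ∀ i ∈ p.2, i < (em.length : Int)) ∧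
    ((PySem.List.enumerate em).foldl pvBoundStep PySem.Dict.empty).items =
      ((PySem.List.enumerate em).foldl pvGroupStep PySem.Dict.empty).items.map pvMM := by
  induction em using List.reverseRecOn with
  | nil =>
      refine ⟨?_, ?_, ?_⟩ <;> simp [PySem.List.enumerate_nil, PySem.Dict.empty, PySem.Dict.keys]
  | append_singleton xs x ih =>
      obtain ⟨hnd, hbd, hmap⟩ := ih
      simp only [PySem.List.enumerate_append, PySem.List.enumerate_cons,
        PySem.List.enumerate_nil, List.foldl_append, List.foldl_cons, List.foldl_nil,
        zero_add] at *
      set dA := (PySem.List.enumerate xs 0).foldl pvGroupStep PySem.Dict.empty with hdA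
      set dB := (PySem.List.enumerate xs 0).foldl pvBoundStep PySem.Dict.empty with hdB
      set n : Int := (xs.length : Int) with hn
      have keysB : dB.keys = dA.keys := by
        simp only [PySem.Dict.keys, hmap, List.map_map]
        exact List.map_congr_left (fun p _ => rfl)
      have containsB : dB.contains x = dA.contains x := by
        rw [PySem.Dict.contains_eq_decide_mem_keys, PySem.Dict.contains_eq_decide_mem_keys, keysB]
      have hndB : dB.keys.Nodup := keysB ▸ hnd
      by_cases hc : dA.contains x = true
      · -- existing key: both dicts overwrite the entry for x in place
        obtain ⟨l, hl⟩ : ∃ l, dA.get? x = some l := by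
          have := PySem.Dict.contains_eq_isSome_get? dA x
          rw [hc] at this
          cases hg : dA.get? x with
          | none => rw [hg] at this; simp at this
          | some l => exact ⟨l, rfl⟩
        have hlmem : (x, l) ∈ dA.items := (PySem.Dict.get?_eq_some_iff_mem_items dA x l hnd).mp hl
        obtain ⟨hlne, hlbd⟩ := hbd (x, l) hlmem
        have hBget : dB.get? x = some (pvMM (x, l)).2 := by
          apply PySem.Dict.get?_of_mem_items _ _ hndB
          rw [hmap]
          exact List.mem_map.mpr ⟨(x, l), hlmem, rfl⟩
        have hAstep : pvGroupStep dA (n, x) = dA.insert x (l ++ [n]) := by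
          rw [pvGroupStep_eq]
          simp [PySem.Dict.getD_of_get?_eq_some dA [] hl]
        have hBstep : pvBoundStep dB (n, x) = dB.insert x ((pvMM (x, l)).2.1, n) := by
          simp [pvBoundStep, hBget]
        rw [hAstep, hBstep]
        have hcB : dB.contains x = true := containsB.trans hc
        refine ⟨PySem.Dict.nodup_keys_insert _ _ _ hnd, ?_, ?_⟩
        · intro p hp
          rw [PySem.Dict.items_insert_of_contains dA _ hc] at hp
          obtain ⟨q, hq, rfl⟩ := List.mem_map.mp hp
          by_cases hqx : (q.1 == x) = true
          · simp only [hqx, if_pos]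
            constructor
            · simp
            · intro i hi
              rcases List.mem_append.mp hi with h1 | h2
              · have := hlbd i h1
                push_cast [List.length_append]; omega
              · simp at h2; subst h2; rw [hn]; push_cast [List.length_append, List.length_singleton]; omega
          · simp only [hqx, if_neg, Bool.not_eq_true] at *
            obtain ⟨h1, h2⟩ := hbd q hq
            exact ⟨h1, fun i hi => by have := h2 i hi; push_cast [List.length_append]; omega⟩
        · rw [PySem.Dict.items_insert_of_contains dA _ hc,
              PySem.Dict.items_insert_of_contains dB _ hcB, hmap, List.map_map, List.map_map]
          apply List.map_congr_left
          intro p hp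
          by_cases hpx : (p.1 == x) = true
          · have hpl : p = (x, l) := by
              have hx : p.1 = x := by simpa using hpx
              have : dA.get? p.1 = some p.2 :=
                PySem.Dict.get?_of_mem_items dA (by simpa using hp) hnd
              rw [hx, hl] at this
              cases p; simp_all
            subst hpl
            simp only [Function.comp, hpx, if_pos, pvMM]
            have h1 := pv_min_append l n hlne hlbd
            have h2 := pv_max_append l n hlbd
            simp [h1, h2]
          · simp [Function.comp, hpx, pvMM]
      · -- fresh key: both dicts append a new entry for x
        have hcf : dA.contains x = false := by simpa using hc
        have hcBf : dB.contains x = false := by rw [containsB]; exact hcf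
        have hBnone : dB.get? x = none := by
          have := PySem.Dict.contains_eq_isSome_get? dB x
          rw [hcBf] at this
          cases hg : dB.get? x with
          | none => rfl
          | some v => rw [hg] at this; simp at this
        have hAstep : pvGroupStep dA (n, x) = dA.insert x [n] := by
          rw [pvGroupStep_eq]
          simp [PySem.Dict.getD_of_not_contains dA [] hcf]
        have hBstep : pvBoundStep dB (n, x) = dB.insert x (n, n) := by
          simp [pvBoundStep, hBnone]
        rw [hAstep, hBstep]
        refine ⟨PySem.Dict.nodup_keys_insert _ _ _ hnd, ?_, ?_⟩
        · intro p hp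
          rw [PySem.Dict.items_insert_of_not_contains dA _ hcf] at hp
          rcases List.mem_append.mp hp with h1 | h2
          · obtain ⟨ha, hb⟩ := hbd p h1
            exact ⟨ha, fun i hi => by have := hb i hi; push_cast [List.length_append]; omega⟩
          · simp at h2; subst h2
            refine ⟨by simp, ?_⟩
            intro i hi; simp at hi; subst hi; rw [hn]; push_cast [List.length_append, List.length_singleton]; omega
        · rw [PySem.Dict.items_insert_of_not_contains dA _ hcf,
              PySem.Dict.items_insert_of_not_contains dB _ hcBf, hmap, List.map_append]
          congr 1

theorem pv_ranges_eq (em : List Int) :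
    map_passage_to_embedding_range_py em = map_passage_to_embedding_range_py_alt em := by
  obtain ⟨hnd, hbd, hmap⟩ := pv_invariant em
  unfold map_passage_to_embedding_range_py map_passage_to_embedding_range_py_alt
  set dA := (PySem.List.enumerate em).foldl pvGroupStep PySem.Dict.empty with hdA
  set dB := (PySem.List.enumerate em).foldl pvBoundStep PySem.Dict.empty with hdB
  have hstep : dA.items.foldl pvRangeStep PySem.Dict.empty =
      dA.items.foldl (fun d p => d.insert p.1
        ((PySem.List.min? p.2 (fun x => x)).getD 0,
         (PySem.List.max? p.2 (fun x => x)).getD 0 + 1)) PySem.Dict.empty := by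
    apply PySem.List.foldl_congr_mem
    intro acc p hp
    have h1 := (hbd p hp).1
    simp [pvRangeStep, List.isEmpty_iff, h1]
  simp only []
  rw [hstep,
    PySem.Dict.items_foldl_insert_fresh dA.items Prod.fst _ _
      (fun a _ => PySem.Dict.contains_empty _) (by simpa [PySem.Dict.keys] using hnd),
    hmap, List.map_map]
  simp only [PySem.Dict.empty, List.nil_append]
  apply List.map_congr_left
  intro p hp
  simp [pvMM, Function.comp]

-- ===== VERDICT (by name: the statement is the Claim_ definition above) =====
theorem map_passage_to_embedding_range_py_spec : Claim_equal_map_passage_to_embedding_range_py := by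
  intro em _
  unfold Spec_map_passage_to_embedding_range_py
  exact pv_ranges_eq em
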